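-- pv_equiv track=rewrite | github.com/poojithaganta/sololearn-solutions | sololearn python/easy/pro/land ho/land_ho.py | landho
-- ===== SOURCE A (Python) =====
-- def landho(num):
--     time = 10
--     if num<20:
--         return time
--     while num>=20:
--         num -= 20
--         time += 20
--         if num<20 and num>0:
--              break
--     return time
-- ===== SOURCE B (Python) =====
-- def landho(num):
--     if num < 20:
--         return 10
--     return 10 + 20 * (num // 20)
-- ===== Notes on version B (the rewrite author's own statement) =====
-- stated objective: simpler
-- what changed: Replaced the subtract-and-accumulate while loop with a single closed-form floor-division formula.
import Mathlib
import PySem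

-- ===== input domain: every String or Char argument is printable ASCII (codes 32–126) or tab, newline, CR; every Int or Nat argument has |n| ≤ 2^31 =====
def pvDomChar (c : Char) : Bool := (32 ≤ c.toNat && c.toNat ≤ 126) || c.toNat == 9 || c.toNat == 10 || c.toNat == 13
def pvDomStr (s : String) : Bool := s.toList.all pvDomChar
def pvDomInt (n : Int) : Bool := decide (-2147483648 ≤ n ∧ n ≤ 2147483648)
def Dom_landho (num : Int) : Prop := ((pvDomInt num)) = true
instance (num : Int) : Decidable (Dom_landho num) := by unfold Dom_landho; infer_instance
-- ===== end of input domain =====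

-- B replaces A's subtract-and-accumulate loop with the closed form 10 + 20*(num//20) (simpler).

-- ===== PORT A =====
-- the while loop of A, state (num, time); the break condition is kept as in the source
def landhoLoop (num time : Int) : Int :=
  if _h : 20 ≤ num then
    let num' := num - 20
    let time' := time + 20
    if num' < 20 ∧ 0 < num' then time'
    else landhoLoop num' time'
  else time
termination_by num.toNat
decreasing_by omega

def landho (num : Int) : Int :=
  let time : Int := 10
  if num < 20 then time
  else landhoLoop num time

-- ===== PORT B =====
def landho_alt (num : Int) : Int :=
  if num < 20 then 10
  else 10 + 20 * (PySem.Int.floordiv num 20)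

-- ===== PRECONDITION & SPEC =====
def Spec_landho (num : Int) (out : Int) : Prop := out = landho_alt num
instance (num : Int) (out : Int) : Decidable (Spec_landho num out) := by unfold Spec_landho; infer_instance

-- ===== CLAIM (what is proved, stated in full; the proofs are below) =====
def Claim_equal_landho : Prop := ∀ (num : Int), Dom_landho num → Spec_landho num (landho num)

-- ===== LEMMAS AND PROOFS =====
theorem landhoLoop_eq (n : Nat) (num time : Int) (hn : num.toNat = n) (h : 20 ≤ num) :
    landhoLoop num time = time + 20 * (num / 20) := by
  induction n using Nat.strong_induction_on generalizing num time with
  | _ n ih =>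
    rw [landhoLoop.eq_def]
    simp only [h, dite_true]
    split_ifs with hbr
    · omega
    · by_cases h2 : 20 ≤ num - 20
      · rw [ih (num - 20).toNat (by omega) _ _ rfl h2]
        omega
      · rw [landhoLoop.eq_def]
        simp only [show ¬ (20 ≤ num - 20) from h2, dite_false]
        omega

-- ===== VERDICT (by name: the statement is the Claim_ definition above) =====

theorem landho_spec : Claim_equal_landho := by
  unfold Claim_equal_landho Spec_landho landho landho_alt
  intro num _
  by_cases h : num < 20
  · simp [h]
  · simp only [h, if_false]
    rw [landhoLoop_eq num.toNat _ _ rfl (by omega),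
        PySem.Int.floordiv_eq_ediv_of_pos (by omega)]
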